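-- pv_equiv track=rewrite | github.com/HornHehhf/RR | commonsense/commonsense_utils.py | get_majority_prediction
-- ===== SOURCE A (Python) =====
-- def get_answer_option(answer):
--     answer = answer.lower()
--     if "the answer is yes" in answer or "the answer is probably yes" in answer \
--             or "the answer is most likely yes" in answer or answer.startswith('yes,') \
--             or answer.startswith('yes.') or answer == 'yes':
--         answer_option = "yes"
--     elif "the answer is no" in answer or "the answer is probably no" in answer \
--             or "the answer is most likely no" in answer \
--             or answer.startswith('no,') or answer.startswith('no.') or answer == 'no':
--         answer_option = "no"
--     else:
--         answer_option = "unclear"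
--     return answer_option
--
-- def get_majority_prediction(predictions):
--     prediction_num = {'yes': 0, 'no': 0, 'unclear': 0}
--     for prediction in predictions[:9]:
--         prediction = prediction.replace('\n', '').strip()
--         prediction = get_answer_option(prediction)
--         prediction_num[prediction] += 1
--     if prediction_num['yes'] > prediction_num['no']:
--         return "yes"
--     elif prediction_num['yes'] < prediction_num['no']:
--         return "no"
--     else:
--         return "unclear"
-- ===== SOURCE B (Python) =====
-- def _matches(a, label):
--     return (("the answer is " + label) in a
--             or ("the answer is probably " + label) in a
--             or ("the answer is most likely " + label) in a
--             or a.startswith(label + ",") or a.startswith(label + ".")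
--             or a == label)
--
-- def _classify(answer):
--     a = answer.lower()
--     for label in ("yes", "no"):
--         if _matches(a, label):
--             return label
--     return "unclear"
--
-- def _resolve(votes):
--     # pair cancellation: one 'yes' annihilates one 'no'; the survivor wins
--     if "yes" in votes and "no" in votes:
--         votes.remove("yes")
--         votes.remove("no")
--         return _resolve(votes)
--     return votes[0] if votes else "unclear"
--
-- def get_majority_prediction(predictions):
--     votes = [v for v in (_classify(p.replace('\n', '').strip()) for p in predictions[:9])
--              if v != "unclear"]
--     return _resolve(votes)
-- ===== Notes on version B (the rewrite author's own statement) =====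
-- stated objective: alternative
-- what changed: Instead of keeping per-label counters and comparing them, B collects the non-unclear votes into a list and decides the winner by recursive pair cancellation (repeatedly removing one 'yes' together with one 'no'; the surviving label, if any, is the answer); the classifier is a loop over the two labels building their patterns.
import Mathlib
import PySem

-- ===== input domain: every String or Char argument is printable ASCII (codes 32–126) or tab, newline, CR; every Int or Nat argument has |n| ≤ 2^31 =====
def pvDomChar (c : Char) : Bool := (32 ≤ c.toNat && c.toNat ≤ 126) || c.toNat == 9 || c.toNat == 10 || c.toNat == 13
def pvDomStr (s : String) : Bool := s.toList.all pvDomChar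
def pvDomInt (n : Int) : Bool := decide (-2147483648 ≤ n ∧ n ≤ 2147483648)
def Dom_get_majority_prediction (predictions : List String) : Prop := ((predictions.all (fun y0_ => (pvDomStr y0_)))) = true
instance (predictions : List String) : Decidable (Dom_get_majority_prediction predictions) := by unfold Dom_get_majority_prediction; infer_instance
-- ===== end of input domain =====

-- B replaces A's counter dict and count comparison by collecting the non-unclear votes in a list
-- and resolving the winner by recursive pair cancellation (one 'yes' annihilates one 'no').
-- ===== PORT A =====
def get_answer_option (answer : String) : String :=
  let answer := PySem.Str.lower answer
  if PySem.Str.isIn "the answer is yes" answer || PySem.Str.isIn "the answer is probably yes" answer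
      || PySem.Str.isIn "the answer is most likely yes" answer || PySem.Str.startswith answer "yes,"
      || PySem.Str.startswith answer "yes." || answer == "yes" then "yes"
  else if PySem.Str.isIn "the answer is no" answer || PySem.Str.isIn "the answer is probably no" answer
      || PySem.Str.isIn "the answer is most likely no" answer
      || PySem.Str.startswith answer "no," || PySem.Str.startswith answer "no." || answer == "no" then "no"
  else "unclear"

def get_majority_prediction (predictions : List String) : String :=
  let prediction_num : PySem.Dict String Int :=
    ((PySem.Dict.empty.insert "yes" 0).insert "no" 0).insert "unclear" 0
  let prediction_num :=
    (PySem.List.slice predictions none (some 9)).foldl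
      (fun d prediction =>
        let prediction := PySem.Str.strip (PySem.Str.replace prediction "\n" "")
        let prediction := get_answer_option prediction
        d.modify prediction 0 (· + 1)) prediction_num
  if prediction_num.getD "yes" 0 > prediction_num.getD "no" 0 then "yes"
  else if prediction_num.getD "yes" 0 < prediction_num.getD "no" 0 then "no"
  else "unclear"

-- ===== PORT B =====
-- _matches(a, label): does the lowercased answer a express this label?
def pvMatches (a label : String) : Bool :=
  PySem.Str.isIn ("the answer is " ++ label) a
    || PySem.Str.isIn ("the answer is probably " ++ label) a
    || PySem.Str.isIn ("the answer is most likely " ++ label) a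
    || PySem.Str.startswith a (label ++ ",") || PySem.Str.startswith a (label ++ ".")
    || a == label

-- _classify: the first of the two labels the answer matches, else 'unclear'
def pvClassify (answer : String) : String :=
  let a := PySem.Str.lower answer
  match (["yes", "no"].find? (fun label => pvMatches a label)) with
  | some label => label
  | none => "unclear"

-- _resolve: pair cancellation; the two 'remove' calls cannot fail inside the guard (totality proofs only)
def pvResolve (votes : List String) : String :=
  if h : "yes" ∈ votes ∧ "no" ∈ votes then
    match h1 : PySem.List.remove? votes "yes" with
    | some v1 =>
      match h2 : PySem.List.remove? v1 "no" with
      | some v2 => pvResolve v2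
      | none =>
        absurd (by
          have e1 := PySem.List.remove?_eq_some_erase votes "yes" h.1
          rw [h1] at e1
          cases e1
          exact (List.mem_erase_of_ne (a := "no") (b := "yes") (by decide)).mpr h.2)
          ((PySem.List.remove?_eq_none_iff _ _).mp h2)
    | none => absurd h.1 ((PySem.List.remove?_eq_none_iff _ _).mp h1)
  else
    match votes with
    | [] => "unclear"
    | x :: _ => x
termination_by votes.length
decreasing_by
  have e1 := PySem.List.remove?_eq_some_erase votes "yes" h.1
  rw [h1] at e1
  cases e1
  have hn1 : "no" ∈ votes.erase "yes" := (List.mem_erase_of_ne (a := "no") (b := "yes") (by decide)).mpr h.2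
  have e2 := PySem.List.remove?_eq_some_erase _ "no" hn1
  rw [h2] at e2
  cases e2
  have l1 := List.length_erase_of_mem h.1
  have l2 := List.length_erase_of_mem hn1
  have p1 : 0 < votes.length := List.length_pos_of_mem h.1
  have p2 : 0 < (votes.erase "yes").length := List.length_pos_of_mem hn1
  omega

def get_majority_prediction_alt (predictions : List String) : String :=
  let votes :=
    ((PySem.List.slice predictions none (some 9)).map
        (fun p => pvClassify (PySem.Str.strip (PySem.Str.replace p "\n" "")))).filter
      (· != "unclear")
  pvResolve votes

-- ===== PRECONDITION & SPEC =====
def Spec_get_majority_prediction (predictions : List String) (out : String) : Prop := out = get_majority_prediction_alt predictions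
instance (predictions : List String) (out : String) : Decidable (Spec_get_majority_prediction predictions out) := by unfold Spec_get_majority_prediction; infer_instance

-- ===== CLAIM (what is proved, stated in full; the proofs are below) =====
def Claim_equal_get_majority_prediction : Prop := ∀ (predictions : List String), Dom_get_majority_prediction predictions → Spec_get_majority_prediction predictions (get_majority_prediction predictions)

-- ===== LEMMAS AND PROOFS =====

-- the two classifiers agree on every string
lemma classify_eq (s : String) : pvClassify s = get_answer_option s := by
  unfold pvClassify get_answer_option
  cases hy : pvMatches (PySem.Str.lower s) "yes" <;> cases hn : pvMatches (PySem.Str.lower s) "no" <;>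
  · simp_all [List.find?, pvMatches]
    cases h1 : (PySem.Str.lower s == "yes") <;> cases h2 : (PySem.Str.lower s == "no") <;> simp_all <;>
      (try rcases hy with ((((h|h)|h)|h)|h)) <;> (try rcases hn with ((((g|g)|g)|g)|g)) <;> simp_all

-- A's classifier only returns one of the three labels
lemma gao_range (s : String) :
    get_answer_option s = "yes" ∨ get_answer_option s = "no" ∨ get_answer_option s = "unclear" := by
  simp only [get_answer_option]
  split_ifs <;> simp

-- resolution by pair cancellation = comparison of counts, for vote lists over {yes, no}
lemma resolve_spec (votes : List String) :
    (∀ x ∈ votes, x = "yes" ∨ x = "no") → pvResolve votes =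
      (if votes.count "yes" > votes.count "no" then "yes"
       else if votes.count "yes" < votes.count "no" then "no" else "unclear") := by
  fun_induction pvResolve votes with
  | case1 votes h v1 h1 v2 h2 ih =>
    intro hv
    have e1 := PySem.List.remove?_eq_some_erase votes "yes" h.1
    rw [h1] at e1
    cases e1
    have hn1 : "no" ∈ votes.erase "yes" := (List.mem_erase_of_ne (a := "no") (b := "yes") (by decide)).mpr h.2
    have e2 := PySem.List.remove?_eq_some_erase _ "no" hn1
    rw [h2] at e2
    cases e2
    rw [ih (fun x hx => hv x (List.mem_of_mem_erase (List.mem_of_mem_erase hx)))]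
    rw [List.count_erase_of_ne (by decide), List.count_erase_self,
        List.count_erase_self, List.count_erase_of_ne (by decide)]
    have hcy : 1 ≤ votes.count "yes" := List.one_le_count_iff.mpr h.1
    have hcn : 1 ≤ votes.count "no" := List.one_le_count_iff.mpr h.2
    split_ifs <;> first | rfl | omega
  | case2 _ _ =>
    intro _
    simp
  | case3 x xs h _ =>
    intro hv
    rcases hv x (by simp) with hx | hx <;> subst hx
    · have hno : "no" ∉ "yes" :: xs := fun hm => h ⟨by simp, hm⟩
      have h0 : ("yes" :: xs).count "no" = 0 := List.count_eq_zero.mpr hno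
      have hle : 1 ≤ ("yes" :: xs).count "yes" := List.one_le_count_iff.mpr (by simp)
      simp only [h0]
      rw [if_pos (by omega)]
    · have hys : "yes" ∉ "no" :: xs := fun hm => h ⟨hm, by simp⟩
      have h0 : ("no" :: xs).count "yes" = 0 := List.count_eq_zero.mpr hys
      have hle : 1 ≤ ("no" :: xs).count "no" := List.one_le_count_iff.mpr (by simp)
      simp only [h0]
      rw [if_neg (by omega), if_pos (by omega)]

-- ===== VERDICT (by name: the statement is the Claim_ definition above) =====
theorem get_majority_prediction_spec : Claim_equal_get_majority_prediction := by
  intro predictions _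
  unfold Spec_get_majority_prediction get_majority_prediction get_majority_prediction_alt
  set l := PySem.List.slice predictions none (some 9) with hl
  have hfold : ∀ (d : PySem.Dict String Int) (v : String),
      (l.foldl (fun d p =>
          d.modify (get_answer_option (PySem.Str.strip (PySem.Str.replace p "\n" ""))) 0 (· + 1)) d).getD v 0
        = d.getD v 0 + ((l.map (fun p => get_answer_option (PySem.Str.strip (PySem.Str.replace p "\n" "")))).count v : Int) := by
    intro d v
    have h := PySem.Dict.getD_foldl_modify_add_one
      (l.map (fun p => get_answer_option (PySem.Str.strip (PySem.Str.replace p "\n" "")))) d v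
    rw [List.foldl_map] at h
    exact h
  have hLA : (l.map (fun p => pvClassify (PySem.Str.strip (PySem.Str.replace p "\n" ""))))
      = l.map (fun p => get_answer_option (PySem.Str.strip (PySem.Str.replace p "\n" ""))) := by
    simp [classify_eq]
  have hmem : ∀ x ∈ (l.map (fun p => get_answer_option (PySem.Str.strip (PySem.Str.replace p "\n" "")))).filter
      (· != "unclear"), x = "yes" ∨ x = "no" := by
    intro x hx
    rw [List.mem_filter] at hx
    obtain ⟨hx1, hx2⟩ := hx
    obtain ⟨p, -, hp⟩ := List.mem_map.mp hx1
    subst hp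
    rcases gao_range (PySem.Str.strip (PySem.Str.replace p "\n" "")) with h | h | h <;> simp_all
  simp only [hfold, hLA]
  rw [resolve_spec _ hmem]
  rw [List.count_filter (by decide), List.count_filter (by decide)]
  have h0y : (((PySem.Dict.empty.insert "yes" (0:Int)).insert "no" 0).insert "unclear" 0).getD "yes" 0 = 0 := by decide
  have h0n : (((PySem.Dict.empty.insert "yes" (0:Int)).insert "no" 0).insert "unclear" 0).getD "no" 0 = 0 := by decide
  rw [h0y, h0n]
  split_ifs <;> first | rfl | omega
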